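-- pv_equiv track=rewrite | github.com/ksu-cs-cc/ksu-cs-cc.github.io | content/4-cc315/z-instructor-resources/mod1_compare.py | appender_list
-- ===== SOURCE A (Python) =====
-- def appender_list(num, base):
--     result = []
--     for i in range(num):
--         result.append(base)
--         if i%2 == 0:
--             result.append(" ")
--         else:
--             result.append(", ")
--     result = "".join(result)
--     return result
-- ===== SOURCE B (Python) =====
-- def appender_list(num, base):
--     if num <= 0:
--         return ""
--     unit = base + " " + base + ", "
--     result = unit * (num // 2)
--     if num % 2 == 1:
--         result += base + " "
--     return result
-- ===== Notes on version B (the rewrite author's own statement) =====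
-- stated objective: simpler
-- what changed: Replaces the per-index loop (append base plus an alternating separator for each i, then join) with a closed form: one even/odd pair 'unit' repeated num//2 times by string multiplication plus one odd tail.
import Mathlib
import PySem

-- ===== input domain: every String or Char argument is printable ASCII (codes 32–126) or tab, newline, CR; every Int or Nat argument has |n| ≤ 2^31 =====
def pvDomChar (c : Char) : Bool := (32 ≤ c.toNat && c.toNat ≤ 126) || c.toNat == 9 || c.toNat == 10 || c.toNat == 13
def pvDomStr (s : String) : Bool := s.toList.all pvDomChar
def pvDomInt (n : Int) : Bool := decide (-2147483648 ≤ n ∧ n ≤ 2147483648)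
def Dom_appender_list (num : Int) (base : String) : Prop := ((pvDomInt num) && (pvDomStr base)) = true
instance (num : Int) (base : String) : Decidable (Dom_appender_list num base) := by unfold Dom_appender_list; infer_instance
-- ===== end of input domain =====

-- B replaces A's per-index loop-and-join with a closed form (one even/odd "unit" string
-- repeated num//2 times plus an odd tail); return values proved equal on all inputs.

-- ===== PORT A =====
-- literal port: build the list of pieces over range(num), then "".join
def appender_list (num : Int) (base : String) : String :=
  let result : List String :=
    (PySem.List.pyRange 0 num 1).foldl
      (fun r i =>
        let r := r ++ [base]
        if PySem.Int.mod i 2 = 0 then r ++ [" "] else r ++ [", "]) []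
  PySem.Str.join "" result

-- ===== PORT B =====
-- Python string multiplication s * k (empty for k ≤ 0); exact
def pyStrMul (s : String) (k : Int) : String :=
  pyStrMulNat s k.toNat
where pyStrMulNat (s : String) : Nat → String
  | 0 => ""
  | n + 1 => pyStrMulNat s n ++ s

def appender_list_alt (num : Int) (base : String) : String :=
  if num ≤ 0 then ""
  else
    let unit := base ++ " " ++ base ++ ", "
    let result := pyStrMul unit (PySem.Int.floordiv num 2)
    if PySem.Int.mod num 2 = 1 then result ++ (base ++ " ") else result

-- ===== PRECONDITION & SPEC =====
def Spec_appender_list (num : Int) (base : String) (out : String) : Prop := out = appender_list_alt num base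
instance (num : Int) (base : String) (out : String) : Decidable (Spec_appender_list num base out) := by unfold Spec_appender_list; infer_instance

-- ===== CLAIM (what is proved, stated in full; the proofs are below) =====
def Claim_equal_appender_list : Prop := ∀ (num : Int) (base : String), Dom_appender_list num base → Spec_appender_list num base (appender_list num base)

-- ===== LEMMAS AND PROOFS =====

theorem joinEmpty (l : List (List Char)) : PySem.Chars.join [] l = l.flatten := by
  induction l with
  | nil => simp [PySem.Chars.join_nil]
  | cons p rest ih =>
    cases rest with
    | nil => simp [PySem.Chars.join_singleton]
    | cons q r =>
      rw [PySem.Chars.join_cons_cons]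
      simp_all

theorem pyStrMulNat_toList (s : String) (n : Nat) :
    (pyStrMul.pyStrMulNat s n).toList = (List.replicate n s.toList).flatten := by
  induction n with
  | zero => simp [pyStrMul.pyStrMulNat]
  | succ k ih =>
    rw [pyStrMul.pyStrMulNat]
    simp [ih, List.replicate_succ']

theorem mod_natCast_two (k : Nat) : PySem.Int.mod (k : Int) 2 = ((k % 2 : Nat) : Int) := by
  exact_mod_cast PySem.Int.mod_natCast k 2

-- closed form of A on natural n
theorem A_closed (base : String) (n : Nat) :
    (appender_list (n : Int) base).toList
    = (List.replicate (n / 2) (base ++ " " ++ base ++ ", ").toList).flatten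
      ++ (if n % 2 = 1 then base.toList ++ [' '] else []) := by
  induction n with
  | zero =>
    simp [appender_list, PySem.List.pyRange_one_eq_nil, PySem.Str.toList_join,
      PySem.Chars.join_nil]
  | succ k ih =>
    have hrange : PySem.List.pyRange 0 ((k + 1 : Nat) : Int) 1
        = PySem.List.pyRange 0 (k : Nat) 1 ++ [(k : Int)] := by
      push_cast
      exact PySem.List.pyRange_one_succ_right (by positivity)
    unfold appender_list at ih ⊢
    rw [hrange]
    simp only [List.foldl_append, List.foldl_cons, List.foldl_nil]
    simp only [PySem.Str.toList_join, joinEmpty, String.toList_empty] at ih ⊢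
    have hmod := mod_natCast_two k
    rcases Nat.even_or_odd k with hk | hk
    · have h0 : k % 2 = 0 := Nat.even_iff.mp hk
      have hc : PySem.Int.mod (k : Int) 2 = 0 := by rw [hmod, h0]; rfl
      have h1 : (k + 1) % 2 = 1 := by omega
      have h2 : (k + 1) / 2 = k / 2 := by omega
      rw [if_pos hc]
      simp only [List.map_append, List.flatten_append, h1, h2]
      rw [ih]
      simp [h0]
    · have h0 : k % 2 = 1 := Nat.odd_iff.mp hk
      have hc : ¬ PySem.Int.mod (k : Int) 2 = 0 := by rw [hmod, h0]; decide
      have h1 : (k + 1) % 2 = 0 := by omega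
      have h2 : (k + 1) / 2 = k / 2 + 1 := by omega
      rw [if_neg hc]
      simp only [List.map_append, List.flatten_append, h1, h2]
      rw [ih]
      simp [h0, List.replicate_succ']

-- closed form of B on positive num
theorem B_closed (base : String) (n : Nat) (hn : ¬ ((n : Int) ≤ 0)) :
    (appender_list_alt (n : Int) base).toList
    = (List.replicate (n / 2) (base ++ " " ++ base ++ ", ").toList).flatten
      ++ (if n % 2 = 1 then base.toList ++ [' '] else []) := by
  unfold appender_list_alt
  rw [if_neg hn]
  have hdiv : PySem.Int.floordiv (n : Int) 2 = ((n / 2 : Nat) : Int) := by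
    exact_mod_cast PySem.Int.floordiv_natCast n 2
  have hmod := mod_natCast_two n
  simp only [hdiv, hmod, pyStrMul, Int.toNat_natCast]
  rcases Nat.even_or_odd n with hk | hk
  · have h0 : n % 2 = 0 := Nat.even_iff.mp hk
    rw [h0]
    simp [pyStrMulNat_toList]
  · have h0 : n % 2 = 1 := Nat.odd_iff.mp hk
    rw [h0]
    simp [pyStrMulNat_toList]

-- ===== VERDICT (by name: the statement is the Claim_ definition above) =====
theorem appender_list_spec : Claim_equal_appender_list := by
  intro num base _
  unfold Spec_appender_list
  apply String.toList_inj.mp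
  by_cases h : num ≤ 0
  · have hA : appender_list num base = "" := by
      unfold appender_list
      rw [PySem.List.pyRange_one_eq_nil h]
      rfl
    have hB : appender_list_alt num base = "" := by
      unfold appender_list_alt
      rw [if_pos h]
    rw [hA, hB]
  · have hn : num = ((num.toNat : Nat) : Int) := by omega
    rw [hn, A_closed, B_closed]
    rw [← hn]; exact h
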